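-- pv_equiv track=rewrite | github.com/Destiny-star03/Discord_bot_study | crawler/notice_detail.py | _grid_to_codeblock
-- ===== SOURCE A (Python) =====
-- def _grid_to_codeblock(grid: list[list[str]], max_width: int = 80) -> str:
--     if not grid:
--         return ""
--
--     # 너무 긴 셀은 자르기
--     def clip(s: str, n: int = 24) -> str:
--         s = s or ""
--         return s if len(s) <= n else (s[: n - 1] + "…")
--
--     clipped = [[clip(c) for c in row] for row in grid]
--
--     cols = len(clipped[0])
--     widths = [0] * cols
--     for row in clipped:
--         for i, c in enumerate(row):
--             widths[i] = max(widths[i], len(c))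
--
--     # 전체 폭 너무 넓으면 폭 제한
--     total = sum(widths) + (3 * (cols - 1))
--     if total > max_width:
--         # 폭이 큰 컬럼부터 조금씩 줄이기
--         order = sorted(range(cols), key=lambda i: widths[i], reverse=True)
--         while total > max_width and order:
--             i = order[0]
--             if widths[i] <= 6:
--                 order.pop(0)
--                 continue
--             widths[i] -= 1
--             total = sum(widths) + (3 * (cols - 1))
--
--     def fmt_row(row):
--         out = []
--         for i, c in enumerate(row):
--             c = clip(c, widths[i])  # 최종 폭에 맞춰 클립
--             out.append(c.ljust(widths[i]))
--         return " | ".join(out)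
--
--     lines = []
--     lines.append(fmt_row(clipped[0]))
--     lines.append("-" * min(max_width, len(lines[0])))
--     for r in clipped[1:]:
--         lines.append(fmt_row(r))
--
--     return "```text\n" + "\n".join(lines) + "\n```"
-- ===== SOURCE B (Python) =====
-- def _grid_to_codeblock(grid: list[list[str]], max_width: int = 80) -> str:
--     if not grid:
--         return ""
--
--     def clip(s: str, n: int = 24) -> str:
--         s = s or ""
--         return s if len(s) <= n else (s[: n - 1] + "…")
--
--     clipped = [[clip(c) for c in row] for row in grid]
--     cols = len(clipped[0])
--
--     # column maxima in one comprehension instead of a fold with in-place updates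
--     widths = [max((len(r[i]) for r in clipped if i < len(r)), default=0)
--               for i in range(cols)]
--
--     # bulk width reduction: allocate the whole deficit over the columns,
--     # widest first, instead of shaving one unit per loop iteration
--     needed = sum(widths) + 3 * (cols - 1) - max_width
--     if needed > 0:
--         for i in sorted(range(cols), key=lambda i: widths[i], reverse=True):
--             take = min(widths[i] - 6, needed)
--             if take > 0:
--                 widths[i] -= take
--                 needed -= take
--                 if needed <= 0:
--                     break
--
--     rows_out = [" | ".join(clip(c, widths[i]).ljust(widths[i])
--                            for i, c in enumerate(row))
--                 for row in clipped]
--     header = rows_out[0]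
--     body = "\n".join([header, "-" * min(max_width, len(header))] + rows_out[1:])
--     return "```text\n" + body + "\n```"
-- ===== Notes on version B (the rewrite author's own statement) =====
-- stated objective: alternative
-- what changed: Column widths are computed as per-column maxima by comprehension instead of an in-place fold over rows, and the one-unit-at-a-time width-reduction while-loop (re-summing all widths each iteration) is replaced by a single bulk pass that allocates the whole deficit take = min(width-6, needed) per column over the same widest-first order; row formatting becomes join-of-comprehension instead of append loops.
import Mathlib
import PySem

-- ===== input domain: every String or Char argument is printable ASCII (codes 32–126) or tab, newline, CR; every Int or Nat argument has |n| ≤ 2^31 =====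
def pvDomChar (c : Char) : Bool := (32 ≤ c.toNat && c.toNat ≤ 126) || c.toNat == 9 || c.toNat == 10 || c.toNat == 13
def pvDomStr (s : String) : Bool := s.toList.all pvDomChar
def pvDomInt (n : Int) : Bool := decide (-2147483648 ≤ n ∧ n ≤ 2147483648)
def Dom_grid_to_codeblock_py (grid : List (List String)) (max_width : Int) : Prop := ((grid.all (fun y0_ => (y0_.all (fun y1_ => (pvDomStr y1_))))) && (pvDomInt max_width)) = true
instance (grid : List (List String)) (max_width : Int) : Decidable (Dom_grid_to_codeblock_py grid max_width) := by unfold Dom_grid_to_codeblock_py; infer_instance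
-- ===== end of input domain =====

-- B restructures A: column widths by per-column maxima instead of an in-place fold, the
-- one-unit-at-a-time width-reduction while-loop replaced by one bulk widest-first
-- allocation pass, and formatting by join-of-map instead of append loops (objective: alternative).

-- ===== PORT A =====

-- shared helper: Python `clip(s, n)` (the `s or ""` is the identity on strings)
def pvClip (s : List Char) (n : Int) : List Char :=
  if (s.length : Int) ≤ n then s else PySem.List.slice s none (some (n - 1)) ++ ['…']

-- `widths[i]` / `widths[i] = v` (index from enumerate/range, always ≥ 0; out-of-range
-- access is a totality guard — Python raises there, excluded by Pre_)
def pvGetI (ws : List Int) (i : Int) : Int := ws.getD i.toNat 0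
def pvSetI (ws : List Int) (i : Int) (v : Int) : List Int := ws.set i.toNat v

-- Python `c.ljust(n)` (exact: pads with spaces up to n, no-op if already that long)
def pvLjust (s : List Char) (n : Int) : List Char :=
  s ++ List.replicate (n - (s.length : Int)).toNat ' '

-- body of A's widths loop: `widths[i] = max(widths[i], len(c))`
def pvUpd (ws : List Int) (ic : Int × List Char) : List Int :=
  pvSetI ws ic.1 (max (pvGetI ws ic.1) ((ic.2.length : Int)))

-- A's inner `for i, c in enumerate(row)` loop
def pvInner (ws : List Int) (row : List (List Char)) : List Int :=
  (PySem.List.enumerate row 0).foldl pvUpd ws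

-- A's widths accumulation over all rows
def pvWidthsA (clipped : List (List (List Char))) (cols : Nat) : List Int :=
  clipped.foldl pvInner (List.replicate cols 0)

-- termination facts for pvDrain (cited by its decreasing_by)
theorem pvSum_set (ws : List Int) (k : Nat) (h : k < ws.length) (v : Int) :
    (ws.set k v).sum = ws.sum - ws.getD k 0 + v := by
  induction ws generalizing k with
  | nil => simp at h
  | cons a t ih =>
    cases k with
    | zero => simp [List.sum_cons]; ring
    | succ k =>
      simp only [List.set_cons_succ, List.sum_cons, List.getD_cons_succ,
        ih k (by simpa using h)]
      ring

theorem pvGetI_pos_lt (ws : List Int) (i : Int) (h : ¬ pvGetI ws i ≤ 6) :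
    i.toNat < ws.length := by
  by_contra hc
  have hle : ws.length ≤ i.toNat := Nat.le_of_not_lt hc
  have hz : pvGetI ws i = 0 := List.getD_eq_default ws 0 hle
  rw [hz] at h
  exact h (by norm_num)

-- A's `while total > max_width and order:` loop (sep = 3*(cols-1), recomputed total)
def pvDrain (mw sep : Int) (ws : List Int) (order : List Int) : List Int :=
  if h : ws.sum + sep > mw then
    match order with
    | [] => ws
    | i :: rest =>
      if h2 : pvGetI ws i ≤ 6 then pvDrain mw sep ws rest
      else pvDrain mw sep (pvSetI ws i (pvGetI ws i - 1)) (i :: rest)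
  else ws
termination_by ((ws.sum + sep - mw).toNat, order.length)
decreasing_by
  · apply Prod.Lex.right
    simp
  · apply Prod.Lex.left
    have hlt := pvGetI_pos_lt ws i h2
    have hs := pvSum_set ws i.toNat hlt (pvGetI ws i - 1)
    have hg : pvGetI ws i = ws.getD i.toNat 0 := rfl
    simp only [pvSetI, hs]
    omega

-- A's fmt_row: append loop then " | ".join
def pvFmtA (widths : List Int) (row : List (List Char)) : List Char :=
  PySem.Chars.join " | ".toList
    ((PySem.List.enumerate row 0).foldl
      (fun out ic => out ++ [pvLjust (pvClip ic.2 (pvGetI widths ic.1)) (pvGetI widths ic.1)]) [])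

def grid_to_codeblock_py (grid : List (List String)) (max_width : Int) : String :=
  if grid = [] then "" else
  let clipped : List (List (List Char)) :=
    grid.map (fun row => row.map (fun c => pvClip c.toList 24))
  let cols : Nat := (clipped.headD []).length
  let widths1 := pvWidthsA clipped cols
  let order := PySem.List.sorted (PySem.List.pyRange 0 (cols : Int) 1)
      (fun i => pvGetI widths1 i) true
  let widths := pvDrain max_width (3 * ((cols : Int) - 1)) widths1 order
  let header := pvFmtA widths (clipped.headD [])
  let dash := List.replicate (min max_width ((header.length : Int))).toNat '-'
  let lines := clipped.tail.foldl (fun ls r => ls ++ [pvFmtA widths r]) [header, dash]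
  String.ofList ("```text\n".toList ++ PySem.Chars.join ['\n'] lines ++ "\n```".toList)

-- ===== PORT B =====

-- B's per-column maximum: max((len(r[i]) for r in clipped if i < len(r)), default=0)
def pvColMax (clipped : List (List (List Char))) (i : Nat) : Int :=
  PySem.List.maxD
    ((clipped.filter (fun r => decide (i < r.length))).map (fun r => ((r.getD i []).length : Int)))
    (fun x => x) 0

-- B's bulk allocation pass over the sorted column order
def pvAlloc : List Int → Int → List Int → List Int
  | ws, _, [] => ws
  | ws, needed, i :: rest =>
    let take := min (pvGetI ws i - 6) needed
    if 0 < take then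
      let ws' := pvSetI ws i (pvGetI ws i - take)
      if needed - take ≤ 0 then ws' else pvAlloc ws' (needed - take) rest
    else pvAlloc ws needed rest

-- B's row formatting: join of a comprehension
def pvFmtB (widths : List Int) (row : List (List Char)) : List Char :=
  PySem.Chars.join " | ".toList
    ((PySem.List.enumerate row 0).map
      (fun ic => pvLjust (pvClip ic.2 (pvGetI widths ic.1)) (pvGetI widths ic.1)))

def grid_to_codeblock_py_alt (grid : List (List String)) (max_width : Int) : String :=
  if grid = [] then "" else
  let clipped : List (List (List Char)) :=
    grid.map (fun row => row.map (fun c => pvClip c.toList 24))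
  let cols : Nat := (clipped.headD []).length
  let widths0 := (List.range cols).map (fun i => pvColMax clipped i)
  let needed := widths0.sum + 3 * ((cols : Int) - 1) - max_width
  let widths := if 0 < needed then
      pvAlloc widths0 needed
        (PySem.List.sorted (PySem.List.pyRange 0 (cols : Int) 1)
          (fun i => pvGetI widths0 i) true)
    else widths0
  let rows_out := clipped.map (fun row => pvFmtB widths row)
  let header := rows_out.headD []
  let dash := List.replicate (min max_width ((header.length : Int))).toNat '-'
  String.ofList ("```text\n".toList ++
    PySem.Chars.join ['\n'] ([header, dash] ++ rows_out.tail) ++ "\n```".toList)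

-- ===== PRECONDITION & SPEC =====
-- Pre_ excludes grids in which some row is longer than the first row: there both A and B
-- raise IndexError (widths[i] is indexed past the first row's column count).
def Pre_grid_to_codeblock_py (grid : List (List String)) (max_width : Int) : Prop :=
  ∀ row ∈ grid, row.length ≤ (grid.headD []).length
instance (grid : List (List String)) (max_width : Int) :
    Decidable (Pre_grid_to_codeblock_py grid max_width) := by
  unfold Pre_grid_to_codeblock_py; infer_instance

def pvWitness_grid_to_codeblock_py : List (List String) × Int :=
  ([["ab", "c"], ["d"]], 10)

def Spec_grid_to_codeblock_py (grid : List (List String)) (max_width : Int) (out : String) : Prop := out = grid_to_codeblock_py_alt grid max_width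
instance (grid : List (List String)) (max_width : Int) (out : String) : Decidable (Spec_grid_to_codeblock_py grid max_width out) := by unfold Spec_grid_to_codeblock_py; infer_instance

-- ===== CLAIM (what is proved, stated in full; the proofs are below) =====
def Claim_equal_grid_to_codeblock_py : Prop := ∀ (grid : List (List String)) (max_width : Int), Dom_grid_to_codeblock_py grid max_width → Pre_grid_to_codeblock_py grid max_width → Spec_grid_to_codeblock_py grid max_width (grid_to_codeblock_py grid max_width)

-- ===== LEMMAS AND PROOFS =====

theorem pv_alloc_step (ws : List Int) (i : Int) (need : Int) (rest : List Int)
    (hw : 6 < pvGetI ws i) (hn : 1 < need) :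
    pvAlloc ws need (i :: rest) =
      pvAlloc (pvSetI ws i (pvGetI ws i - 1)) (need - 1) (i :: rest) := by
  have hiw : i.toNat < ws.length := pvGetI_pos_lt ws i (by omega)
  have hget : pvGetI (pvSetI ws i (pvGetI ws i - 1)) i = pvGetI ws i - 1 := by
    unfold pvGetI pvSetI
    rw [List.getD_eq_getElem?_getD, List.getElem?_set_self hiw]
    rfl
  simp only [pvAlloc, hget]
  by_cases hw7 : (6 : Int) < pvGetI ws i - 1
  · have eA : pvSetI (pvSetI ws i (pvGetI ws i - 1)) i
        ((pvGetI ws i - 1) - min (pvGetI ws i - 1 - 6) (need - 1)) =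
        pvSetI ws i (pvGetI ws i - min (pvGetI ws i - 6) need) := by
      unfold pvSetI
      rw [List.set_set]
      congr 1
      omega
    have e2 : (need - 1) - min (pvGetI ws i - 1 - 6) (need - 1)
        = need - min (pvGetI ws i - 6) need := by omega
    rw [if_pos (show (0 : Int) < min (pvGetI ws i - 6) need by omega),
      if_pos (show (0 : Int) < min (pvGetI ws i - 1 - 6) (need - 1) by omega),
      eA, e2]
  · have hm : min (pvGetI ws i - 6) need = 1 := by omega
    rw [if_pos (by omega), if_neg (by omega), hm, if_neg (by omega)]

theorem pv_drain_eq_alloc (mw sep : Int) (ws : List Int) (order : List Int) :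
    pvDrain mw sep ws order =
      if 0 < ws.sum + sep - mw then pvAlloc ws (ws.sum + sep - mw) order else ws := by
  fun_induction pvDrain mw sep ws order with
  | case1 ws h =>
    rw [if_pos (by omega)]
    rfl
  | case2 ws h i rest h2 ih =>
    have hc : (0 : Int) < ws.sum + sep - mw := by omega
    rw [ih, if_pos hc, if_pos hc]
    simp only [pvAlloc]
    rw [if_neg (show ¬ (0 : Int) < min (pvGetI ws i - 6) (ws.sum + sep - mw) by omega)]
  | case3 ws h i rest h2 ih =>
    have hiw : i.toNat < ws.length := pvGetI_pos_lt ws i h2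
    have hsum : (pvSetI ws i (pvGetI ws i - 1)).sum = ws.sum - 1 := by
      unfold pvSetI
      rw [pvSum_set ws i.toNat hiw]
      have hg : ws.getD i.toNat 0 = pvGetI ws i := rfl
      omega
    rw [ih, hsum,
      if_pos (show (0 : Int) < ws.sum + sep - mw by omega)]
    by_cases hone : ws.sum + sep - mw = 1
    · rw [if_neg (show ¬ (0 : Int) < ws.sum - 1 + sep - mw by omega)]
      simp only [pvAlloc, hone]
      rw [show min (pvGetI ws i - 6) (1 : Int) = 1 from by omega,
        if_pos (show (0 : Int) < 1 by norm_num),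
        if_pos (show (1 : Int) - 1 ≤ 0 by norm_num)]
    · rw [if_pos (show (0 : Int) < ws.sum - 1 + sep - mw by omega),
        show ws.sum - 1 + sep - mw = ws.sum + sep - mw - 1 from by ring]
      exact (pv_alloc_step ws i (ws.sum + sep - mw) rest (by omega) (by omega)).symm
  | case4 ws h =>
    rw [if_neg (by omega)]

theorem pv_inner_len (row : List (List Char)) : ∀ (s : Int) (ws : List Int),
    ((PySem.List.enumerate row s).foldl pvUpd ws).length = ws.length := by
  induction row with
  | nil => intro s ws; simp [PySem.List.enumerate]
  | cons x xs ih =>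
    intro s ws
    rw [PySem.List.enumerate_cons, List.foldl_cons, ih]
    simp [pvUpd, pvSetI]

theorem pv_inner_getD (row : List (List Char)) : ∀ (s : Nat) (ws : List Int) (j : Nat),
    s + row.length ≤ ws.length →
    ((PySem.List.enumerate row (s : Int)).foldl pvUpd ws).getD j 0 =
      if s ≤ j ∧ j < s + row.length
      then max (ws.getD j 0) (((row.getD (j - s) []).length : Int))
      else ws.getD j 0 := by
  induction row with
  | nil =>
    intro s ws j _
    simp only [PySem.List.enumerate_nil, List.foldl_nil, List.length_nil]
    rw [if_neg (by omega)]
  | cons x xs ih =>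
    intro s ws j h
    have hs : s < ws.length := by
      simp only [List.length_cons] at h
      omega
    rw [PySem.List.enumerate_cons, List.foldl_cons]
    have hcast : (s : Int) + 1 = ((s + 1 : Nat) : Int) := by push_cast; ring
    rw [hcast, ih (s + 1) (pvUpd ws ((s : Int), x)) j
      (by simp only [pvUpd, pvSetI, List.length_set]
          simp only [List.length_cons] at h
          omega)]
    have hupd : ∀ k : Nat, (pvUpd ws ((s : Int), x)).getD k 0 =
        if k = s then max (ws.getD s 0) ((x.length : Int)) else ws.getD k 0 := by
      intro k
      by_cases hk : k = s
      · subst hk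
        simp [pvUpd, pvSetI, pvGetI, Int.toNat_natCast, List.getD_eq_getElem?_getD,
          List.getElem?_set_self hs]
      · rw [if_neg hk]
        simp [pvUpd, pvSetI, pvGetI, Int.toNat_natCast, List.getD_eq_getElem?_getD,
          List.getElem?_set_ne (fun e => hk e.symm)]
    rw [hupd j]
    by_cases hj : j = s
    · subst hj
      rw [if_neg (by omega), if_pos rfl,
        if_pos (by simp only [List.length_cons]; omega)]
      simp
    · rw [if_neg hj]
      by_cases hin : s + 1 ≤ j ∧ j < s + 1 + xs.length
      · rw [if_pos hin, if_pos (by simp only [List.length_cons]; omega)]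
        have hjs : j - s = (j - (s + 1)) + 1 := by omega
        rw [hjs, List.getD_cons_succ]
      · rw [if_neg hin, if_neg (by simp only [List.length_cons]; omega)]

theorem pv_inner_getD0 (row : List (List Char)) (ws : List Int) (j : Nat)
    (h : row.length ≤ ws.length) :
    (pvInner ws row).getD j 0 =
      if j < row.length
      then max (ws.getD j 0) (((row.getD j []).length : Int))
      else ws.getD j 0 := by
  have h0 := pv_inner_getD row 0 ws j (by simpa using h)
  simpa [pvInner] using h0

theorem pv_outer_len (rows : List (List (List Char))) : ∀ (ws : List Int),
    (rows.foldl pvInner ws).length = ws.length := by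
  induction rows with
  | nil => intro ws; simp
  | cons r rs ih =>
    intro ws
    rw [List.foldl_cons, ih]
    exact pv_inner_len r 0 ws

theorem pv_outer_getD (rows : List (List (List Char))) : ∀ (ws : List Int) (j : Nat),
    (∀ r ∈ rows, r.length ≤ ws.length) →
    (rows.foldl pvInner ws).getD j 0 =
      ((rows.filter (fun r => decide (j < r.length))).map
        (fun r => ((r.getD j []).length : Int))).foldl max (ws.getD j 0) := by
  induction rows with
  | nil => intro ws j _; simp
  | cons r rs ih =>
    intro ws j hr
    rw [List.foldl_cons,
      ih (pvInner ws r) j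
        (fun r' h' => by
          unfold pvInner
          rw [pv_inner_len]
          exact hr r' (by simp [h'])),
      pv_inner_getD0 r ws j (hr r (by simp))]
    by_cases hj : j < r.length
    · rw [if_pos hj]
      simp [hj]
    · rw [if_neg hj]
      simp [hj]

theorem pv_max?_cons (vs : List Int) : ∀ (v : Int),
    PySem.List.max? (v :: vs) (fun x => x) = some (vs.foldl max v) := by
  induction vs with
  | nil => intro v; rfl
  | cons x xs ih =>
    intro v
    have hstep : PySem.List.max? (v :: x :: xs) (fun y => y)
        = PySem.List.max? (max v x :: xs) (fun y => y) := by
      simp only [PySem.List.max?, List.foldl_cons]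
      congr 1
      show (if v < x then some x else some v) = some (max v x)
      by_cases hvx : v < x
      · rw [if_pos hvx, max_eq_right (le_of_lt hvx)]
      · rw [if_neg hvx, max_eq_left (not_lt.mp hvx)]
    rw [hstep, ih (max v x)]
    rfl

theorem pv_maxD_foldl (vals : List Int) (h : ∀ v ∈ vals, 0 ≤ v) :
    PySem.List.maxD vals (fun x => x) 0 = vals.foldl max 0 := by
  cases vals with
  | nil => rfl
  | cons v vs =>
    have hv : (0 : Int) ≤ v := h v (by simp)
    unfold PySem.List.maxD
    rw [pv_max?_cons vs v, List.foldl_cons,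
      show max (0 : Int) v = v from max_eq_right hv]
    rfl

theorem pv_widths_eq (clipped : List (List (List Char))) (cols : Nat)
    (h : ∀ r ∈ clipped, r.length ≤ cols) :
    pvWidthsA clipped cols = (List.range cols).map (fun i => pvColMax clipped i) := by
  have hlen1 : (pvWidthsA clipped cols).length = cols := by
    unfold pvWidthsA
    rw [pv_outer_len]
    simp
  apply List.ext_getElem
  · rw [hlen1]; simp
  · intro j h1 h2
    have hj : j < cols := by rwa [hlen1] at h1
    have hA : (pvWidthsA clipped cols).getD j 0 = (pvWidthsA clipped cols)[j] := by
      rw [List.getD_eq_getElem?_getD, List.getElem?_eq_getElem h1]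
      rfl
    rw [← hA]
    unfold pvWidthsA
    rw [pv_outer_getD clipped (List.replicate cols 0) j
      (by intro r hr; simpa using h r hr)]
    have hrep : (List.replicate cols (0 : Int)).getD j 0 = 0 := by
      rw [List.getD_eq_getElem?_getD, List.getElem?_replicate]
      simp [hj]
    rw [hrep, List.getElem_map, List.getElem_range]
    unfold pvColMax
    rw [pv_maxD_foldl _ (by
      intro v hv
      simp only [List.mem_map] at hv
      obtain ⟨r, _, rfl⟩ := hv
      exact Int.natCast_nonneg _)]

theorem pv_fmt_eq (widths : List Int) (row : List (List Char)) :
    pvFmtA widths row = pvFmtB widths row := by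
  unfold pvFmtA pvFmtB
  rw [PySem.List.foldl_append_singleton_eq_map]
  simp

-- ===== VERDICT (by name: the statement is the Claim_ definition above) =====
theorem grid_to_codeblock_py_spec : Claim_equal_grid_to_codeblock_py := by
  intro grid max_width _hdom hpre
  unfold Spec_grid_to_codeblock_py
  cases grid with
  | nil => rfl
  | cons g0 gt =>
    unfold grid_to_codeblock_py grid_to_codeblock_py_alt
    rw [if_neg (by simp), if_neg (by simp)]
    simp only [List.map_cons, List.headD_cons, List.tail_cons]
    have hlen : ∀ r ∈ (g0.map (fun c => pvClip c.toList 24)) ::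
        gt.map (fun row => row.map (fun c => pvClip c.toList 24)),
        r.length ≤ (g0.map (fun c => pvClip c.toList 24)).length := by
      intro r hr
      simp only [List.length_map]
      rcases List.mem_cons.mp hr with h0 | h1
      · subst h0; simp
      · obtain ⟨row, hrow, rfl⟩ := List.mem_map.mp h1
        have hp := hpre row (by simp [hrow])
        simpa using hp
    rw [pv_widths_eq _ _ hlen, pv_drain_eq_alloc]
    simp only [pv_fmt_eq]
    rw [PySem.List.foldl_append_singleton_eq_map]
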